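-- pv_equiv track=rewrite | github.com/Surya-77/personal-advent-of-code-2020 | Day13/13.py | yield_looper
-- ===== SOURCE A (Python) =====
-- def yield_iterator(seed, sequence, offset):
--     for i in sequence:
--         if (i + offset) % seed == 0:
--             yield i
--
-- def yield_looper(seed_list, sequence):
--     next_seq = sequence
--     offset = 0
--     for seed in seed_list:
--         if seed != 0:
--             next_seq = yield_iterator(seed, next_seq, offset)
--         offset += 1
--     return next_seq
-- ===== SOURCE B (Python) =====
-- def yield_looper(seed_list, sequence):
--     cons = [(idx, s) for idx, s in enumerate(seed_list) if s != 0]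
--     if not cons:
--         return sequence
--     return (i for i in sequence if all((i + off) % s == 0 for off, s in cons))
-- ===== Notes on version B (the rewrite author's own statement) =====
-- stated objective: simpler
-- what changed: Replaces A's chain of k lazily-stacked generator layers (one per nonzero seed) with a precomputed constraint table and a single flat filtering pass checking all modular constraints at once.
import Mathlib
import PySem

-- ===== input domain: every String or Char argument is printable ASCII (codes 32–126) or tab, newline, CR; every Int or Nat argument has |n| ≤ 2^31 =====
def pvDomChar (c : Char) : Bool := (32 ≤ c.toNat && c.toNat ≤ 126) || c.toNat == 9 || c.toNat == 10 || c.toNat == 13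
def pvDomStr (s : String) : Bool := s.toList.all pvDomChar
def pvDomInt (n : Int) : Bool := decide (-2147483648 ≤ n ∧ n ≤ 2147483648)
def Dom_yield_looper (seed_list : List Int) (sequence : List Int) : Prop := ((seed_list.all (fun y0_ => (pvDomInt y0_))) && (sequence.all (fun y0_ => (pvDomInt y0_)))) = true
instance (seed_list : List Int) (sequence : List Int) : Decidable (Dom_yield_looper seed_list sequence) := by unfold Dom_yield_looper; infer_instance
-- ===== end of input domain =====

-- B collapses A's stack of per-seed generator layers into one flat filtering pass over a
-- precomputed constraint table (objective: simpler).

-- ===== PORT A =====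
-- A stacks one lazy filter (yield_iterator) per nonzero seed; consuming the final generator
-- applies the filters innermost-first, i.e. left-to-right over seed_list. Ported as a fold
-- carrying (next_seq, offset); stepA is one iteration of A's loop body.
def stepA (st : List Int × Int) (seed : Int) : List Int × Int :=
  (if seed ≠ 0 then st.1.filter (fun i => PySem.Int.mod (i + st.2) seed == 0) else st.1,
   st.2 + 1)

def yield_looper (seed_list : List Int) (sequence : List Int) : List Int :=
  (seed_list.foldl stepA (sequence, 0)).1

-- ===== PORT B =====
def yield_looper_alt (seed_list : List Int) (sequence : List Int) : List Int :=
  let cons := (PySem.List.enumerate seed_list 0).filter (fun p => p.2 != 0)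
  if cons.isEmpty then sequence
  else sequence.filter (fun i => cons.all (fun p => PySem.Int.mod (i + p.1) p.2 == 0))

-- ===== PRECONDITION & SPEC =====
def Spec_yield_looper (seed_list : List Int) (sequence : List Int) (out : List Int) : Prop := out = yield_looper_alt seed_list sequence
instance (seed_list : List Int) (sequence : List Int) (out : List Int) : Decidable (Spec_yield_looper seed_list sequence out) := by unfold Spec_yield_looper; infer_instance

-- ===== CLAIM (what is proved, stated in full; the proofs are below) =====
def Claim_equal_yield_looper : Prop := ∀ (seed_list : List Int) (sequence : List Int), Dom_yield_looper seed_list sequence → Spec_yield_looper seed_list sequence (yield_looper seed_list sequence)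

-- ===== LEMMAS AND PROOFS =====

-- A's fold applies the filters of the nonzero seeds left-to-right; that equals one filter by
-- the conjunction of all constraints collected from the enumeration starting at `off`.
theorem yield_looper_foldl_eq_filter_all (seeds : List Int) (seq : List Int) (off : Int) :
    (seeds.foldl stepA (seq, off)).1
    = seq.filter (fun i =>
        ((PySem.List.enumerate seeds off).filter (fun p => p.2 != 0)).all
          (fun p => PySem.Int.mod (i + p.1) p.2 == 0)) := by
  induction seeds generalizing seq off with
  | nil => simp [PySem.List.enumerate_nil]
  | cons s rest ih =>
    rw [List.foldl_cons]
    by_cases hs : s = 0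
    · subst hs
      have h1 : stepA (seq, off) 0 = (seq, off + 1) := by simp [stepA]
      rw [h1, ih]
      have h2 : (PySem.List.enumerate (0 :: rest) off).filter (fun p => p.2 != 0)
              = (PySem.List.enumerate rest (off + 1)).filter (fun p => p.2 != 0) := by
        rw [PySem.List.enumerate_cons]; simp
      rw [h2]
    · have h1 : stepA (seq, off) s
              = (seq.filter (fun i => PySem.Int.mod (i + off) s == 0), off + 1) := by
        simp [stepA, hs]
      rw [h1, ih, List.filter_filter]
      have h2 : (PySem.List.enumerate (s :: rest) off).filter (fun p => p.2 != 0)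
              = (off, s) :: (PySem.List.enumerate rest (off + 1)).filter (fun p => p.2 != 0) := by
        rw [PySem.List.enumerate_cons]; simp [hs]
      rw [h2]
      apply List.filter_congr
      intro i _
      simp [List.all_cons, Bool.and_comm]

-- ===== VERDICT (by name: the statement is the Claim_ definition above) =====
theorem yield_looper_spec : Claim_equal_yield_looper := by
  intro seed_list sequence _
  unfold Spec_yield_looper yield_looper yield_looper_alt
  rw [yield_looper_foldl_eq_filter_all]
  by_cases h : ((PySem.List.enumerate seed_list 0).filter (fun p => p.2 != 0)).isEmpty
  · rw [if_pos h]
    rw [List.isEmpty_iff] at h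
    simp [h]
  · rw [if_neg h]
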